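-- pv_equiv track=rewrite | github.com/EdwinKestler/app_llmsat | nl_query/openai_handler.py | map_keywords_to_segments
-- ===== SOURCE A (Python) =====
-- from typing import Iterable, Dict, List, Tuple, Optional
--
-- SEGMENT_KEYWORDS: Dict[str, set[str]] = {
--     "water": {"water", "river", "lake", "pond", "sea", "ocean"},
--     "tree": {"tree", "trees", "forest", "woodland", "vegetation"},
--     "building": {"building", "buildings", "house", "houses", "structure"},
--     "road": {"road", "roads", "street", "highway", "path"},
-- }
--
-- def map_keywords_to_segments(keywords: Iterable[str]) -> List[str]:
--     segments = []
--     for kw in keywords: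
--         for segment, words in SEGMENT_KEYWORDS.items():
--             if kw in words or kw == segment:
--                 segments.append(segment)
--                 break
--     seen = set()
--     return [s for s in segments if not (s in seen or seen.add(s))]
-- ===== SOURCE B (Python) =====
-- # Reverse index: one dict lookup per keyword instead of scanning all segment sets.
-- WORD_TO_SEGMENT = {
--     "water": "water", "river": "water", "lake": "water", "pond": "water",
--     "sea": "water", "ocean": "water",
--     "tree": "tree", "trees": "tree", "forest": "tree", "woodland": "tree",
--     "vegetation": "tree",
--     "building": "building", "buildings": "building", "house": "building",
--     "houses": "building", "structure": "building",
--     "road": "road", "roads": "road", "street": "road", "highway": "road",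
--     "path": "road",
-- }
--
-- def map_keywords_to_segments(keywords):
--     segs = [WORD_TO_SEGMENT[kw] for kw in keywords if kw in WORD_TO_SEGMENT]
--     return list(dict.fromkeys(segs))
-- ===== Notes on version B (the rewrite author's own statement) =====
-- stated objective: idiomatic
-- what changed: Replaces the per-keyword scan over all segment keyword sets (with break) by a reverse-lookup dict WORD_TO_SEGMENT built once, so each keyword is resolved by a single dict lookup; order-preserving dedup via dict.fromkeys. (constant-factor: the inner scan over the segment table is replaced by one hash lookup)
import Mathlib
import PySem

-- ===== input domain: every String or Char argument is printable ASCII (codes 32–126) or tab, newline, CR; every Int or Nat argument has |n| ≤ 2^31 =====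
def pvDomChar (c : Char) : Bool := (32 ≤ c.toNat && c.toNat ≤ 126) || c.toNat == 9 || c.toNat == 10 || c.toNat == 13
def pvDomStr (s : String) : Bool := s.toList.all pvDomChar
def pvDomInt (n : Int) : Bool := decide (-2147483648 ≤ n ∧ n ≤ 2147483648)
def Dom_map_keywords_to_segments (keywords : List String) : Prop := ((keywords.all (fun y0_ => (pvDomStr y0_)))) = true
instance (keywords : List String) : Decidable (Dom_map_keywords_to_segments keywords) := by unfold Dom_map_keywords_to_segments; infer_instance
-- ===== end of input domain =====

-- B replaces A's per-keyword scan over all segment keyword sets by a reverse-lookup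
-- dict built once, one lookup per keyword (idiomatic; same order-preserving dedup).

-- ===== PORT A =====
def SEGMENT_KEYWORDS : List (String × PySem.Set String) :=
  [("water", PySem.Set.ofList ["water", "river", "lake", "pond", "sea", "ocean"]),
   ("tree", PySem.Set.ofList ["tree", "trees", "forest", "woodland", "vegetation"]),
   ("building", PySem.Set.ofList ["building", "buildings", "house", "houses", "structure"]),
   ("road", PySem.Set.ofList ["road", "roads", "street", "highway", "path"])]

-- inner 'for segment, words in SEGMENT_KEYWORDS.items(): … break'
def pvInner (kw : String) : List (String × PySem.Set String) → List String → List String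
  | [], segments => segments
  | (segment, words) :: rest, segments =>
    if PySem.Set.contains words kw || kw == segment then segments ++ [segment]
    else pvInner kw rest segments

-- 'seen = set(); [s for s in segments if not (s in seen or seen.add(s))]'
def pvDedup : List String → PySem.Set String → List String → List String
  | [], _, out => out
  | s :: rest, seen, out =>
    if PySem.Set.contains seen s then pvDedup rest seen out
    else pvDedup rest (PySem.Set.add seen s) (out ++ [s])

def map_keywords_to_segments (keywords : List String) : List String :=
  let segments := keywords.foldl (fun segments kw => pvInner kw SEGMENT_KEYWORDS segments) []
  pvDedup segments PySem.Set.empty []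

-- ===== PORT B =====
def WORD_TO_SEGMENT : PySem.Dict String String :=
  PySem.Dict.ofList
    [("water", "water"), ("river", "water"), ("lake", "water"), ("pond", "water"),
     ("sea", "water"), ("ocean", "water"),
     ("tree", "tree"), ("trees", "tree"), ("forest", "tree"), ("woodland", "tree"),
     ("vegetation", "tree"),
     ("building", "building"), ("buildings", "building"), ("house", "building"),
     ("houses", "building"), ("structure", "building"),
     ("road", "road"), ("roads", "road"), ("street", "road"), ("highway", "road"),
     ("path", "road")]

def map_keywords_to_segments_alt (keywords : List String) : List String :=
  PySem.List.dedup (keywords.filterMap (fun kw => WORD_TO_SEGMENT.get? kw))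

-- ===== PRECONDITION & SPEC =====
def Spec_map_keywords_to_segments (keywords : List String) (out : List String) : Prop := out = map_keywords_to_segments_alt keywords
instance (keywords : List String) (out : List String) : Decidable (Spec_map_keywords_to_segments keywords out) := by unfold Spec_map_keywords_to_segments; infer_instance

-- ===== CLAIM (what is proved, stated in full; the proofs are below) =====
def Claim_equal_map_keywords_to_segments : Prop := ∀ (keywords : List String), Dom_map_keywords_to_segments keywords → Spec_map_keywords_to_segments keywords (map_keywords_to_segments keywords)

-- ===== LEMMAS AND PROOFS =====

-- A's inner scan over the segment table finds exactly B's reverse-index lookup.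
theorem pvInner_eq_get (kw : String) (segments : List String) :
    pvInner kw SEGMENT_KEYWORDS segments
      = segments ++ (WORD_TO_SEGMENT.get? kw).toList := by
  by_cases hm : kw ∈ ["water", "river", "lake", "pond", "sea", "ocean", "tree", "trees",
      "forest", "woodland", "vegetation", "building", "buildings", "house", "houses",
      "structure", "road", "roads", "street", "highway", "path"]
  · simp only [List.mem_cons, List.not_mem_nil, or_false] at hm
    rcases hm with rfl|rfl|rfl|rfl|rfl|rfl|rfl|rfl|rfl|rfl|rfl|rfl|rfl|rfl|rfl|rfl|rfl|rfl|rfl|rfl|rfl <;> rfl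
  · simp only [List.mem_cons, List.not_mem_nil, or_false, not_or] at hm
    obtain ⟨h1,h2,h3,h4,h5,h6,h7,h8,h9,h10,h11,h12,h13,h14,h15,h16,h17,h18,h19,h20,h21⟩ := hm
    rw [show WORD_TO_SEGMENT = PySem.Dict.mk [("water", "water"), ("river", "water"), ("lake", "water"), ("pond", "water"), ("sea", "water"), ("ocean", "water"), ("tree", "tree"), ("trees", "tree"), ("forest", "tree"), ("woodland", "tree"), ("vegetation", "tree"), ("building", "building"), ("buildings", "building"), ("house", "building"), ("houses", "building"), ("structure", "building"), ("road", "road"), ("roads", "road"), ("street", "road"), ("highway", "road"), ("path", "road")] from rfl]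
    simp [pvInner, SEGMENT_KEYWORDS,
      PySem.Set.contains_eq_listContains, List.contains_eq_mem, PySem.Set.mem_ofList,
      PySem.Dict.get?,
      h1,h2,h3,h4,h5,h6,h7,h8,h9,h10,h11,h12,h13,h14,h15,h16,h17,h18,h19,h20,h21,
      Ne.symm h1,Ne.symm h2,Ne.symm h3,Ne.symm h4,Ne.symm h5,Ne.symm h6,Ne.symm h7,
      Ne.symm h8,Ne.symm h9,Ne.symm h10,Ne.symm h11,Ne.symm h12,Ne.symm h13,Ne.symm h14,
      Ne.symm h15,Ne.symm h16,Ne.symm h17,Ne.symm h18,Ne.symm h19,Ne.symm h20,Ne.symm h21]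

-- A's outer loop over keywords collects exactly B's filterMap of lookups.
theorem pvSegs_eq (ks : List String) (acc : List String) :
    ks.foldl (fun segments kw => pvInner kw SEGMENT_KEYWORDS segments) acc
      = acc ++ ks.filterMap (fun kw => WORD_TO_SEGMENT.get? kw) := by
  induction ks generalizing acc with
  | nil => simp
  | cons k t ih =>
    rw [List.foldl_cons, pvInner_eq_get, ih, List.filterMap_cons]
    cases h : WORD_TO_SEGMENT.get? k <;> simp

-- A's seen-set comprehension is the fold of Set.add when 'seen' and 'out' coincide.
theorem pvDedup_eq_foldl (xs : List String) (s : PySem.Set String) :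
    pvDedup xs s s = xs.foldl PySem.Set.add s := by
  induction xs generalizing s with
  | nil => rfl
  | cons x t ih =>
    simp only [pvDedup, List.foldl_cons, PySem.Set.add]
    by_cases h : PySem.Set.contains s x = true
    · simp only [h, if_true]; exact ih s
    · rw [if_neg h, if_neg h]; exact ih (s ++ [x])

-- ===== VERDICT (by name: the statement is the Claim_ definition above) =====
theorem map_keywords_to_segments_spec : Claim_equal_map_keywords_to_segments := by
  intro keywords _
  unfold Spec_map_keywords_to_segments map_keywords_to_segments map_keywords_to_segments_alt
  rw [pvSegs_eq, List.nil_append,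
      show PySem.Set.empty = ([] : List String) from rfl, pvDedup_eq_foldl,
      PySem.List.dedup_eq_ofList, PySem.Set.ofList_eq_foldl]
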